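-- pv_equiv track=rewrite | github.com/oracle/accelerated-data-science | ads/aqua/utils.py | get_max_version
-- ===== SOURCE A (Python) =====
-- UNKNOWN = ""
--
-- def get_max_version(versions):
--     """Takes in a list of versions and returns the higher version."""
--     if not versions:
--         return UNKNOWN
--
--     def compare_versions(version1, version2):
--         # split version strings into parts and convert to int values for comparison
--         parts1 = list(map(int, version1.split(".")))
--         parts2 = list(map(int, version2.split(".")))
--
--         # compare each part
--         for idx in range(min(len(parts1), len(parts2))):
--             if parts1[idx] < parts2[idx]:
--                 return version2
--             elif parts1[idx] > parts2[idx]: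
--                 return version1
--
--         # if all parts are equal up to this point, return the longer version string
--         return version1 if len(parts1) > len(parts2) else version2
--
--     max_version = versions[0]
--     for version in versions[1:]:
--         max_version = compare_versions(max_version, version)
--
--     return max_version
-- ===== SOURCE B (Python) =====
-- UNKNOWN = ""
--
-- def get_max_version(versions):
--     """Takes in a list of versions and returns the higher version."""
--     if len(versions) < 2:
--         return versions[0] if versions else UNKNOWN
--     s = sorted(versions, key=lambda v: [int(p) for p in v.split(".")])
--     return s[-1]
-- ===== Notes on version B (the rewrite author's own statement) =====
-- stated objective: simpler
-- what changed: Replaces the hand-written part-by-part comparator fold with parsing each version into a list of ints and taking the last element of a stable sort by that key (Python list ordering already encodes the per-part comparison and the length tie-break; sort stability keeps the original's last-occurrence tie behaviour); lists of fewer than two elements are returned directly, as the original does without parsing.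
import Mathlib
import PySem

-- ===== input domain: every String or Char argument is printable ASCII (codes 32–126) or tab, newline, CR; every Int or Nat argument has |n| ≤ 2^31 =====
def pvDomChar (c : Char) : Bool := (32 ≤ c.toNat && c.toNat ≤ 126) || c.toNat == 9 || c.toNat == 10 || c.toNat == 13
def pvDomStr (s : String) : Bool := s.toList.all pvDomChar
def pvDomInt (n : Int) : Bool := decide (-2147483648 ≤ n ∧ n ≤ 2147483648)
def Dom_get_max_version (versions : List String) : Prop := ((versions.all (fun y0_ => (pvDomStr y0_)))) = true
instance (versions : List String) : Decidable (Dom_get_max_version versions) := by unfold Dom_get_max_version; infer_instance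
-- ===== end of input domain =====

-- B replaces A's hand-written comparator fold by a stable sort on the parsed
-- integer-list key and takes the last element (objective: simpler).

-- shared parsing helper: list(map(int, v.split("."))) (getD arms are unreachable inside Pre_)
def pvKey (v : String) : List Int :=
  ((PySem.Str.split? v ".").getD []).map (fun p => (PySem.Int.ofStr? p).getD 0)

-- ===== PORT A =====
-- the 'for idx in range(min(len,len))' loop of compare_versions, as simultaneous recursion
def pvCmpGo (v1 v2 : String) : List Int → List Int → String
  | a :: as, b :: bs =>
      if a < b then v2 else if a > b then v1 else pvCmpGo v1 v2 as bs
  | as, bs => if as.length > bs.length then v1 else v2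

def pvCompareVersions (v1 v2 : String) : String :=
  pvCmpGo v1 v2 (pvKey v1) (pvKey v2)

def get_max_version (versions : List String) : String :=
  match versions with
  | [] => ""
  | v0 :: rest => rest.foldl (fun m v => pvCompareVersions m v) v0

-- ===== PORT B =====
def get_max_version_alt (versions : List String) : String :=
  if versions.length < 2 then
    match versions with
    | v :: _ => v
    | [] => ""
  else
    match (PySem.List.sorted versions pvKey).getLast? with
    | some v => v
    | none => ""

-- ===== PRECONDITION & SPEC =====
-- Pre_ excludes exactly the inputs where A raises: int() gets a ValueError on some dot-part
-- of some element of a list with at least two elements (shorter lists are returned unparsed).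
def Pre_get_max_version (versions : List String) : Prop :=
  versions.length ≤ 1 ∨
    ∀ v ∈ versions, ∀ p ∈ (PySem.Str.split? v ".").getD [], (PySem.Int.ofStr? p).isSome = true
instance (versions : List String) : Decidable (Pre_get_max_version versions) := by
  unfold Pre_get_max_version; infer_instance

def pvWitness_get_max_version : List String := (["1.2.3", "1.10", "1.2"])

def Spec_get_max_version (versions : List String) (out : String) : Prop := out = get_max_version_alt versions
instance (versions : List String) (out : String) : Decidable (Spec_get_max_version versions out) := by unfold Spec_get_max_version; infer_instance

-- ===== CLAIM (what is proved, stated in full; the proofs are below) =====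
def Claim_equal_get_max_version : Prop := ∀ (versions : List String), Dom_get_max_version versions → Pre_get_max_version versions → Spec_get_max_version versions (get_max_version versions)

-- ===== LEMMAS AND PROOFS =====

-- A's comparator decides the strict lexicographic order on the parsed keys
theorem pvCmpGo_eq (v1 v2 : String) :
    ∀ (p1 p2 : List Int), pvCmpGo v1 v2 p1 p2 = if p2 < p1 then v1 else v2 := by
  intro p1
  induction p1 with
  | nil =>
      intro p2
      cases p2 <;> simp [pvCmpGo, List.not_lt_nil]
  | cons a as ih =>
      intro p2
      cases p2 with
      | nil => simp [pvCmpGo, List.nil_lt_cons]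
      | cons b bs =>
          simp only [pvCmpGo, List.cons_lt_cons_iff]
          rcases lt_trichotomy a b with h | h | h
          · simp [h, not_lt_of_gt h]
            intro he _
            exfalso
            omega
          · subst h
            simp [ih bs]
          · simp [h, not_lt_of_gt h]

theorem pvCompare_eq (m v : String) :
    pvCompareVersions m v = if pvKey v < pvKey m then m else v := by
  simpa [pvCompareVersions] using pvCmpGo_eq m v (pvKey m) (pvKey v)

-- the "A-side fold value" as an Option, for empty-safe statements
def pvAopt (xs : List String) : Option String :=
  match xs with
  | [] => none
  | v :: r => some (r.foldl (fun m v => if pvKey v < pvKey m then m else v) v)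

theorem pvInsertBy_ne_nil {α : Type} (before : α → α → Bool) (x : α) (s : List α) :
    PySem.List.insertBy before x s ≠ [] := by
  cases s with
  | nil => simp [PySem.List.insertBy]
  | cons y ys =>
      simp only [PySem.List.insertBy]
      split <;> simp

theorem pvGetLast?_insertBy {α κ : Type} [LinearOrder κ] (key : α → κ)
    (before : α → α → Bool) (hbef : ∀ a b, before a b = true ↔ key a < key b) (x : α) :
    ∀ (s : List α), s.Pairwise (fun a b => key a ≤ key b) →
      (PySem.List.insertBy before x s).getLast? =
        some (match s.getLast? with
              | none => x
              | some m => if key x < key m then m else x) := by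
  intro s
  induction s with
  | nil => intro _; simp [PySem.List.insertBy]
  | cons y ys ih =>
      intro hp
      have hyle : ∀ m, (y :: ys).getLast? = some m → key y ≤ key m := by
        intro m hm
        have hmem : m ∈ y :: ys := List.mem_of_getLast? hm
        rcases List.mem_cons.mp hmem with rfl | hmem
        · exact le_refl _
        · exact (List.pairwise_cons.mp hp).1 m hmem
      simp only [PySem.List.insertBy]
      cases hby : before x y with
      | true =>
        have hx : key x < key y := (hbef x y).mp hby
        rw [if_pos rfl]
        cases hys : (y :: ys).getLast? with
        | none => simp at hys
        | some m =>
            have : key x < key m := lt_of_lt_of_le hx (hyle m hys)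
            simp [List.getLast?_cons_cons, hys, this]
      | false =>
        have hx : ¬ key x < key y := fun h => by simp [(hbef x y).mpr h] at hby
        rw [if_neg (by simp)]
        obtain ⟨z, zs, hz⟩ := List.exists_cons_of_ne_nil
          (pvInsertBy_ne_nil before x ys)
        rw [hz, List.getLast?_cons_cons, ← hz, ih (List.pairwise_cons.mp hp).2]
        cases hys : ys.getLast? with
        | none =>
            have : ys = [] := List.getLast?_eq_none_iff.mp hys
            subst this
            simp [hx]
        | some m =>
            have hne : ys ≠ [] := by
              intro h; subst h; simp at hys
            obtain ⟨w, ws, rfl⟩ := List.exists_cons_of_ne_nil hne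
            rw [List.getLast?_cons_cons, hys]

theorem pvSorted_pairwise (xs : List String) :
    (PySem.List.sorted xs pvKey).Pairwise (fun a b => pvKey a ≤ pvKey b) := by
  have h := PySem.List.sorted_pairwise (κ := List Int) xs pvKey
  convert h using 2

theorem pvSorted_concat {α κ : Type} [LT κ] [DecidableLT κ] (xs : List α) (x : α)
    (key : α → κ) :
    PySem.List.sorted (xs ++ [x]) key =
      PySem.List.insertBy (fun a b => decide (key a < key b)) x
        (PySem.List.sorted xs key) := by
  rw [PySem.List.sorted_eq_foldl_insertBy, PySem.List.sorted_eq_foldl_insertBy,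
    List.foldl_append]
  rfl

theorem pvSorted_getLast? :
    ∀ (xs : List String), (PySem.List.sorted xs pvKey).getLast? = pvAopt xs := by
  intro xs
  induction xs using List.reverseRecOn with
  | nil => simp [PySem.List.sorted_eq_foldl_insertBy, pvAopt]
  | append_singleton xs x ih =>
      rw [pvSorted_concat]
      refine (pvGetLast?_insertBy pvKey _ (fun a b => decide_eq_true_iff) x _
        (pvSorted_pairwise xs)).trans ?_
      rw [ih]
      cases xs with
      | nil => rfl
      | cons v r => simp [pvAopt, List.foldl_append]

-- ===== VERDICT (by name: the statement is the Claim_ definition above) =====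
theorem get_max_version_spec : Claim_equal_get_max_version := by
  intro versions _ _
  unfold Spec_get_max_version get_max_version get_max_version_alt
  cases versions with
  | nil => rfl
  | cons v0 rest =>
      cases rest with
      | nil => rfl
      | cons v1 rs =>
          rw [if_neg (by simp)]
          rw [pvSorted_getLast?]
          simp only [pvAopt]
          exact PySem.List.foldl_congr_mem _ _ _ _ (fun acc x _ => pvCompare_eq acc x)
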